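-- pv_equiv track=rewrite | github.com/16-SulGore/Algorithm | week_01/괄호변환.py | solution
-- ===== SOURCE A (Python) =====
-- def check_bracket_balance(u):
--     stack = []
--     for bracket in u:
--         if bracket == '(':
--             stack.append(0)
--         else:
--             stack and stack.pop()
--     return len(stack) == 0
--
-- def reverse_bracket(u):
--     return ''.join([')' if bracket == '(' else '(' for bracket in u])
--
-- def solution(w):
--     if not w:
--         return w
--     u = v = ''
--     bracket_cnt = [0, 0]
--     for i in range(len(w)):
--         if w[i] == '(':
--             bracket_cnt[0] += 1
--         elif w[i] == ')':
--             bracket_cnt[1] += 1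
--         u += w[i]
--         if bracket_cnt[0] == bracket_cnt[1]:
--             v = w[i+1:]
--             break
--
--     if check_bracket_balance(u):
--         return u + solution(v)
--     else:
--         return '(' + solution(v) + ')' + reverse_bracket(u[1:-1])
-- ===== SOURCE B (Python) =====
-- def check_bracket_balance(u):
--     stack = []
--     for bracket in u:
--         if bracket == '(':
--             stack.append(0)
--         else:
--             stack and stack.pop()
--     return len(stack) == 0
--
-- def reverse_bracket(u):
--     return ''.join([')' if bracket == '(' else '(' for bracket in u])
--
-- def solution(w):
--     # One forward pass cuts w into the shortest balanced-count chunks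
--     # (a trailing never-balanced remainder becomes the final chunk),
--     # then a single right-to-left fold assembles the answer.
--     chunks = []
--     cur = ''
--     opens = closes = 0
--     for ch in w:
--         if ch == '(':
--             opens += 1
--         elif ch == ')':
--             closes += 1
--         cur += ch
--         if opens == closes:
--             chunks.append(cur)
--             cur = ''
--             opens = closes = 0
--     if cur:
--         chunks.append(cur)
--     acc = ''
--     for chunk in reversed(chunks):
--         if check_bracket_balance(chunk):
--             acc = chunk + acc
--         else:
--             acc = '(' + acc + ')' + reverse_bracket(chunk[1:-1])
--     return acc
-- ===== Notes on version B (the rewrite author's own statement) =====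
-- stated objective: faster
-- what changed: A recursively slices off the first balanced-count prefix and recurses on the remainder (re-slicing the string at each level); B cuts w into all shortest balanced-count chunks in one forward counting pass and assembles the result with a single right-to-left fold over the chunk list, eliminating the recursion and the repeated w[i+1:] copies.
import Mathlib
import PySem

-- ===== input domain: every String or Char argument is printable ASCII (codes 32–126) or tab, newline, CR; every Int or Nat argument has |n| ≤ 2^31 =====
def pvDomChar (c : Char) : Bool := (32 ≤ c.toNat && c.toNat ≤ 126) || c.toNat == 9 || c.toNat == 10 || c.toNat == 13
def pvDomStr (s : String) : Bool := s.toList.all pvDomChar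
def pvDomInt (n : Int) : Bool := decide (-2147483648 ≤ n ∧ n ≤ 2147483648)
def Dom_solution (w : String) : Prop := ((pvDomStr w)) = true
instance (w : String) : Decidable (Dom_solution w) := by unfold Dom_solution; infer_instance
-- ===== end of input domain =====

-- B replaces A's slice-and-recurse with one counting pass that cuts w into its
-- shortest balanced-count chunks followed by a single right-to-left fold, eliminating A's recursion and its repeated remainder slices (objective: faster; measured).

-- ===== PORT A =====
-- helper check_bracket_balance
def checkBal (u : List Char) : Bool :=
  (u.foldl
      (fun (stack : List Int) br =>
        if br = '(' then stack ++ [0]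
        else if stack = [] then stack else stack.dropLast)
      []).length = 0

-- helper reverse_bracket
def revBr (u : List Char) : List Char :=
  u.map (fun br => if br = '(' then ')' else '(')

-- A's for-loop with break: walks w counting brackets, returns (u, v) at the
-- first index where the counts become equal ((u, []) if the loop runs out)
def scanA (u : List Char) (c0 c1 : Int) : List Char → List Char × List Char
  | [] => (u, [])
  | ch :: rest =>
    let c0' := if ch = '(' then c0 + 1 else c0
    let c1' := if ch = '(' then c1 else if ch = ')' then c1 + 1 else c1
    let u' := u ++ [ch]
    if c0' = c1' then (u', rest) else scanA u' c0' c1' rest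

-- one-step unfolding of scanA (rfl), used for controlled rewriting
theorem scanA_cons (u : List Char) (c0 c1 : Int) (ch : Char) (rest : List Char) :
    scanA u c0 c1 (ch :: rest) =
      if (if ch = '(' then c0 + 1 else c0) = (if ch = '(' then c1 else if ch = ')' then c1 + 1 else c1)
      then (u ++ [ch], rest)
      else scanA (u ++ [ch]) (if ch = '(' then c0 + 1 else c0)
             (if ch = '(' then c1 else if ch = ')' then c1 + 1 else c1) rest := rfl

-- the remainder of the scan is strictly shorter than the input (termination of A's recursion)
theorem scanA_snd_lt (ch : Char) (rest u : List Char) (c0 c1 : Int) :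
    (scanA u c0 c1 (ch :: rest)).2.length < (ch :: rest).length := by
  induction rest generalizing ch u c0 c1 with
  | nil =>
    rw [scanA_cons]
    by_cases hP : (if ch = '(' then c0 + 1 else c0) = (if ch = '(' then c1 else if ch = ')' then c1 + 1 else c1)
    · rw [if_pos hP]; simp
    · rw [if_neg hP]; simp [scanA]
  | cons x rs ih =>
    rw [scanA_cons]
    by_cases hP : (if ch = '(' then c0 + 1 else c0) = (if ch = '(' then c1 else if ch = ')' then c1 + 1 else c1)
    · rw [if_pos hP]; simp
    · rw [if_neg hP]
      refine Nat.lt_trans (ih x _ _ _) ?_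
      simp

def solutionL : List Char → List Char
  | [] => []
  | ch :: rest =>
    if checkBal (scanA [] 0 0 (ch :: rest)).1 then
      (scanA [] 0 0 (ch :: rest)).1 ++ solutionL (scanA [] 0 0 (ch :: rest)).2
    else
      '(' :: solutionL (scanA [] 0 0 (ch :: rest)).2 ++ ')' ::
        revBr (PySem.List.slice (scanA [] 0 0 (ch :: rest)).1 (some 1) (some (-1)))
termination_by l => l.length
decreasing_by all_goals exact scanA_snd_lt ch rest [] 0 0

def solution (w : String) : String := String.ofList (solutionL w.toList)

-- ===== PORT B =====
-- one step of B's cutting pass: state = (chunks so far, current chunk, open count, close count)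
def stepCut (st : List (List Char) × List Char × Int × Int) (ch : Char) :
    List (List Char) × List Char × Int × Int :=
  let o := if ch = '(' then st.2.2.1 + 1 else st.2.2.1
  let c := if ch = '(' then st.2.2.2 else if ch = ')' then st.2.2.2 + 1 else st.2.2.2
  let cur := st.2.1 ++ [ch]
  if o = c then (st.1 ++ [cur], [], 0, 0) else (st.1, cur, o, c)

-- B's single pass: cut w into shortest balanced-count chunks (+ trailing remainder)
def cut (l : List Char) : List (List Char) :=
  let st := l.foldl stepCut ([], [], 0, 0)
  if st.2.1 = [] then st.1 else st.1 ++ [st.2.1]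

def solution_alt (w : String) : String :=
  String.ofList ((cut w.toList).reverse.foldl
    (fun acc chunk =>
      if checkBal chunk then chunk ++ acc
      else '(' :: acc ++ ')' :: revBr (PySem.List.slice chunk (some 1) (some (-1))))
    [])

-- ===== PRECONDITION & SPEC =====
def Spec_solution (w : String) (out : String) : Prop := out = solution_alt w
instance (w : String) (out : String) : Decidable (Spec_solution w out) := by unfold Spec_solution; infer_instance

-- ===== CLAIM (what is proved, stated in full; the proofs are below) =====
def Claim_equal_solution : Prop := ∀ (w : String), Dom_solution w → Spec_solution w (solution w)

-- ===== LEMMAS AND PROOFS =====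

-- B's cut resumed from an arbitrary mid-chunk state (proof device relating cut to A's scan)
def cutFrom (cur : List Char) (o c : Int) (l : List Char) : List (List Char) :=
  let st := l.foldl stepCut ([], cur, o, c)
  if st.2.1 = [] then st.1 else st.1 ++ [st.2.1]

theorem cut_eq_cutFrom (l : List Char) : cut l = cutFrom [] 0 0 l := rfl

-- already-emitted chunks only prefix the result of B's fold
theorem foldl_stepCut_prefix (l : List Char) (chs : List (List Char)) (cur : List Char) (o c : Int) :
    l.foldl stepCut (chs, cur, o, c)
      = (chs ++ (l.foldl stepCut ([], cur, o, c)).1, (l.foldl stepCut ([], cur, o, c)).2) := by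
  induction l generalizing chs cur o c with
  | nil => simp
  | cons ch rest ih =>
    simp only [List.foldl_cons, stepCut, List.nil_append]
    by_cases hP : (if ch = '(' then o + 1 else o) = (if ch = '(' then c else if ch = ')' then c + 1 else c)
    · simp only [if_pos hP]
      rw [ih (chs ++ [cur ++ [ch]]) [] 0 0, ih [cur ++ [ch]] [] 0 0]
      simp [List.append_assoc]
    · simp only [if_neg hP]
      rw [ih chs (cur ++ [ch])]

-- the finishing step of B's pass: emit the pending chunk if nonempty
def emit (st : List (List Char) × List Char × Int × Int) : List (List Char) :=
  if st.2.1 = [] then st.1 else st.1 ++ [st.2.1]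

theorem emit_prefix (l : List Char) (chs : List (List Char)) (cur : List Char) (o c : Int) :
    emit (l.foldl stepCut (chs, cur, o, c)) = chs ++ emit (l.foldl stepCut ([], cur, o, c)) := by
  rw [foldl_stepCut_prefix]
  generalize l.foldl stepCut ([], cur, o, c) = q
  obtain ⟨a, b, d, e⟩ := q
  by_cases hb : b = [] <;> simp [emit, hb]

-- B's cutting pass performs exactly A's chunk scan, chunk by chunk
theorem cutFrom_eq_scanA (ch : Char) (rest cur : List Char) (o c : Int) :
    cutFrom cur o c (ch :: rest)
      = (scanA cur o c (ch :: rest)).1 :: cutFrom [] 0 0 (scanA cur o c (ch :: rest)).2 := by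
  induction rest generalizing ch cur o c with
  | nil =>
    rw [scanA_cons]
    by_cases hP : (if ch = '(' then o + 1 else o) = (if ch = '(' then c else if ch = ')' then c + 1 else c)
    · rw [if_pos hP]
      have hstep : stepCut ([], cur, o, c) ch = ([cur ++ [ch]], [], 0, 0) := by
        simp [stepCut, hP]
      show emit (List.foldl stepCut ([], cur, o, c) [ch]) = _
      rw [List.foldl_cons, hstep]
      simp [emit, cutFrom]
    · rw [if_neg hP]
      have hstep : stepCut ([], cur, o, c) ch
          = ([], cur ++ [ch], (if ch = '(' then o + 1 else o),
              (if ch = '(' then c else if ch = ')' then c + 1 else c)) := by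
        simp [stepCut, hP]
      show emit (List.foldl stepCut ([], cur, o, c) [ch]) = _
      rw [List.foldl_cons, hstep]
      simp [emit, cutFrom, scanA]
  | cons x rs ih =>
    rw [scanA_cons]
    by_cases hP : (if ch = '(' then o + 1 else o) = (if ch = '(' then c else if ch = ')' then c + 1 else c)
    · rw [if_pos hP]
      have hstep : stepCut ([], cur, o, c) ch = ([cur ++ [ch]], [], 0, 0) := by
        simp [stepCut, hP]
      show emit (List.foldl stepCut ([], cur, o, c) (ch :: x :: rs))
          = (cur ++ [ch]) :: emit (List.foldl stepCut ([], [], 0, 0) (x :: rs))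
      rw [List.foldl_cons, hstep, emit_prefix]
      simp
    · rw [if_neg hP]
      have hstep : stepCut ([], cur, o, c) ch
          = ([], cur ++ [ch], (if ch = '(' then o + 1 else o),
              (if ch = '(' then c else if ch = ')' then c + 1 else c)) := by
        simp [stepCut, hP]
      have hL : cutFrom cur o c (ch :: x :: rs)
          = cutFrom (cur ++ [ch]) (if ch = '(' then o + 1 else o)
              (if ch = '(' then c else if ch = ')' then c + 1 else c) (x :: rs) := by
        show emit (List.foldl stepCut ([], cur, o, c) (ch :: x :: rs)) = _
        rw [List.foldl_cons, hstep]
        rfl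
      rw [hL]
      exact ih x (cur ++ [ch]) _ _

-- A's recursion equals B's right fold over the chunk list
theorem solutionL_eq_foldr : ∀ (l : List Char),
    solutionL l = (cut l).foldr
      (fun chunk acc =>
        if checkBal chunk then chunk ++ acc
        else '(' :: acc ++ ')' :: revBr (PySem.List.slice chunk (some 1) (some (-1))))
      []
  | [] => by simp [solutionL, cut]
  | ch :: rest => by
    rw [cut_eq_cutFrom, cutFrom_eq_scanA, ← cut_eq_cutFrom, List.foldr_cons,
      ← solutionL_eq_foldr (scanA [] 0 0 (ch :: rest)).2]
    simp only [solutionL]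
termination_by l => l.length
decreasing_by exact scanA_snd_lt ch rest [] 0 0

-- ===== VERDICT (by name: the statement is the Claim_ definition above) =====
theorem solution_spec : Claim_equal_solution := by
  intro w _
  unfold Spec_solution solution solution_alt
  rw [List.foldl_reverse]
  exact congrArg String.ofList (solutionL_eq_foldr w.toList)
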